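-- pv_equiv track=rewrite | github.com/tkgaolol/brushcode_juejin | 37.py | solution
-- ===== SOURCE A (Python) =====
-- def solution(s: str) -> str:
--     # PLEASE DO NOT MODIFY THE FUNCTION SIGNATURE
--     n = len(s)
--     # Create a palindrome by mirroring the first half
--     t = list(s[:(n + 1) // 2] + s[:n // 2][::-1])
--
--     if ''.join(t) < s:
--         return ''.join(t)
--
--     # Try to adjust the palindrome
--     for i in range((n - 1) // 2, -1, -1):
--         if t[i] > 'a':
--             t[i] = chr(ord(t[i]) - 1)
--             t[n - i - 1] = t[i]
--             for j in range(i + 1, (n + 1) // 2):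
--                 t[j] = 'z'
--                 t[n - j - 1] = 'z'
--             if ''.join(t) < s:
--                 return ''.join(t)
--
--     return '-1'
-- ===== SOURCE B (Python) =====
-- def _make_pal(h: str, n: int) -> str:
--     return h + h[:n // 2][::-1]
--
-- def solution(s: str) -> str:
--     n = len(s)
--     half = s[:(n + 1) // 2]
--     pal = _make_pal(half, n)
--     if pal < s:
--         return pal
--     # decrement the half: find rightmost position that can be lowered
--     k = len(half)
--     while k > 0 and half[k - 1] <= 'a':
--         k -= 1
--     if k == 0:
--         return '-1'
--     new_half = half[:k - 1] + chr(ord(half[k - 1]) - 1) + 'z' * (len(half) - k)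
--     return _make_pal(new_half, n)
-- ===== Notes on version B (the rewrite author's own statement) =====
-- stated objective: simpler
-- what changed: A mutates the full mirrored list in a decrement-and-retry loop that re-mirrors positions pairwise and re-compares the whole string against s after every candidate decrement; B works on the half only: build the palindrome once, one scan for the rightmost decrementable half position, one rebuild, no retry loop and no repeated whole-string comparisons (the decrement is provably already < s).
import Mathlib
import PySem

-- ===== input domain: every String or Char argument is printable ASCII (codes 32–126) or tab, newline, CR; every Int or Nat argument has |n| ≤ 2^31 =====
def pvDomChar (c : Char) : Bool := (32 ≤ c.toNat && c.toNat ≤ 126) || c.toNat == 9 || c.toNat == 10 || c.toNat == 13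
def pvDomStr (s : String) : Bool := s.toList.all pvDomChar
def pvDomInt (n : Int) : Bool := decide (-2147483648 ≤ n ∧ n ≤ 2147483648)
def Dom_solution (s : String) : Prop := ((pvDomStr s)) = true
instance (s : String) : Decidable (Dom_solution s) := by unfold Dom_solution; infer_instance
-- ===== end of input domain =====

-- B replaces A's decrement-and-retry loop over the mirrored list (which re-checks '< s' after
-- every candidate decrement) by a single half-decrement: mirror the half once, scan once for the
-- rightmost decrementable half position, rebuild once — simpler, no repeated whole-string checks.

-- ===== PORT A =====
-- one step of A's inner j-loop: t[j] = 'z'; t[n - j - 1] = 'z'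
def pvSetZ (n : Nat) (t : List Char) (j : Nat) : List Char :=
  (t.set j 'z').set (n - j - 1) 'z'

-- A's 'for i in range((n - 1) // 2, -1, -1)' loop; fuel k + 1 means the current i is k
def pvALoop (l : List Char) (n : Nat) : List Char → Nat → List Char
  | _, 0 => ['-', '1']
  | t, k + 1 =>
    if 'a' < t.getD k ' ' then
      let d := Char.ofNat ((t.getD k ' ').toNat - 1)
      let t1 := (t.set k d).set (n - k - 1) d
      let t2 := (List.range' (k + 1) ((n + 1) / 2 - (k + 1))).foldl (pvSetZ n) t1
      if t2 < l then t2 else pvALoop l n t2 k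
    else pvALoop l n t k

def solution (s : String) : String :=
  let l := s.toList
  let n := l.length
  let t := l.take ((n + 1) / 2) ++ (l.take (n / 2)).reverse
  if t < l then String.ofList t
  else String.ofList (pvALoop l n t ((n + 1) / 2))

-- ===== PORT B =====
-- _make_pal(h, n) = h + h[:n//2][::-1]
def pvMakePal (h : List Char) (n : Nat) : List Char := h ++ (h.take (n / 2)).reverse

-- 'while k > 0 and half[k - 1] <= 'a': k -= 1'
def pvTrim (h : List Char) : Nat → Nat
  | 0 => 0
  | k + 1 => if h.getD k ' ' ≤ 'a' then pvTrim h k else k + 1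

def solution_alt (s : String) : String :=
  let l := s.toList
  let n := l.length
  let h := l.take ((n + 1) / 2)
  let pal := pvMakePal h n
  if pal < l then String.ofList pal
  else
    let k := pvTrim h h.length
    if k = 0 then "-1"
    else
      let nh := h.take (k - 1) ++ [Char.ofNat ((h.getD (k - 1) ' ').toNat - 1)]
                  ++ List.replicate (h.length - k) 'z'
      String.ofList (pvMakePal nh n)

-- ===== PRECONDITION & SPEC =====
def Spec_solution (s : String) (out : String) : Prop := out = solution_alt s
instance (s : String) (out : String) : Decidable (Spec_solution s out) := by unfold Spec_solution; infer_instance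

-- ===== CLAIM (what is proved, stated in full; the proofs are below) =====
def Claim_equal_solution : Prop := ∀ (s : String), Dom_solution s → Spec_solution s (solution s)

-- ===== LEMMAS AND PROOFS =====

-- A's initial mirrored list
def pvT0 (l : List Char) : List Char :=
  l.take ((l.length + 1) / 2) ++ (l.take (l.length / 2)).reverse

-- B's decremented half, for trim result k ≥ 1
def pvNHx (l : List Char) (k : Nat) : List Char :=
  (l.take ((l.length + 1) / 2)).take (k - 1)
    ++ [Char.ofNat (((l.take ((l.length + 1) / 2)).getD (k - 1) ' ').toNat - 1)]
    ++ List.replicate ((l.length + 1) / 2 - k) 'z'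

-- the common elementwise description of the decremented palindrome (hit at half index k)
def pvSpecChar (l : List Char) (k p : Nat) : Option Char :=
  let q := if p < (l.length + 1) / 2 then p else l.length - 1 - p
  if q < k then l[q]?
  else if q = k then some (Char.ofNat (((l.take ((l.length + 1) / 2)).getD k ' ').toNat - 1))
  else some 'z'

lemma pvHalfLen (l : List Char) : (l.take ((l.length + 1) / 2)).length = (l.length + 1) / 2 := by
  simp; omega

lemma pvT0_len (l : List Char) : (pvT0 l).length = l.length := by
  simp [pvT0]; omega

lemma pvT0_get (l : List Char) (p : Nat) (hp : p < l.length) :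
    (pvT0 l)[p]? = if p < (l.length + 1) / 2 then l[p]? else l[l.length - 1 - p]? := by
  unfold pvT0
  by_cases h : p < (l.length + 1) / 2
  · rw [if_pos h, List.getElem?_append_left (by simp; omega), List.getElem?_take_of_lt h]
  · rw [if_neg h, List.getElem?_append_right (by simp; omega)]
    have hlt : p - (l.take ((l.length + 1) / 2)).length < (l.take (l.length / 2)).length := by
      simp; omega
    rw [List.getElem?_reverse hlt]
    have : (l.take (l.length / 2)).length - 1 - (p - (l.take ((l.length + 1) / 2)).length)
        = l.length - 1 - p := by simp; omega
    rw [this, List.getElem?_take_of_lt (by omega)]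

lemma pvT0_getD (l : List Char) (k : Nat) (hk : k < (l.length + 1) / 2) :
    (pvT0 l).getD k ' ' = (l.take ((l.length + 1) / 2)).getD k ' ' := by
  rw [List.getD_eq_getElem?_getD, List.getD_eq_getElem?_getD,
    pvT0_get l k (by omega), if_pos hk, List.getElem?_take_of_lt hk]

lemma pvFold_get (n m a p : Nat) (t : List Char) (ht : t.length = n) (hp : p < n)
    (hm : a + m ≤ n) :
    ((List.range' a m).foldl (pvSetZ n) t)[p]? =
      if (a ≤ p ∧ p < a + m) ∨ (a + p + 1 ≤ n ∧ n ≤ a + m + p) then some 'z' else t[p]? := by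
  induction m generalizing a t with
  | zero => rw [if_neg (by omega)]; simp
  | succ m ih =>
    rw [List.range'_succ, List.foldl_cons, ih (a + 1) _ (by simpa [pvSetZ] using ht) (by omega)]
    simp only [pvSetZ, List.getElem?_set, List.length_set, ht]
    split_ifs <;> first | rfl | (exfalso; omega)

lemma pvFold_len (n m a : Nat) (t : List Char) :
    ((List.range' a m).foldl (pvSetZ n) t).length = t.length := by
  induction m generalizing a t with
  | zero => simp
  | succ m ih => rw [List.range'_succ, List.foldl_cons, ih]; simp [pvSetZ]

lemma pvNH_get (l : List Char) (k q : Nat) (hk : k < (l.length + 1) / 2)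
    (hq : q < (l.length + 1) / 2) :
    (pvNHx l (k + 1))[q]? =
      if q < k then l[q]?
      else if q = k then some (Char.ofNat (((l.take ((l.length + 1) / 2)).getD k ' ').toNat - 1))
      else some 'z' := by
  unfold pvNHx
  simp only [Nat.add_sub_cancel]
  by_cases h1 : q < k
  · rw [if_pos h1, List.getElem?_append_left (by simp; try omega),
      List.getElem?_append_left (by simp; try omega), List.getElem?_take_of_lt h1,
      List.getElem?_take_of_lt hq]
  · rw [if_neg h1]
    by_cases h2 : q = k
    · subst h2
      rw [if_pos rfl, List.getElem?_append_left (by simp; try omega),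
        List.getElem?_append_right (by simp; try omega)]
      have : q - ((l.take ((l.length + 1) / 2)).take q).length = 0 := by simp; try omega
      rw [this, List.getElem?_cons_zero]
    · rw [if_neg h2, List.getElem?_append_right (by simp; try omega)]
      rw [List.getElem?_replicate_of_lt (by simp; try omega)]

lemma pvNHx_len (l : List Char) (k : Nat) (hk : k < (l.length + 1) / 2) :
    (pvNHx l (k + 1)).length = (l.length + 1) / 2 := by
  simp [pvNHx]; omega

lemma pvSideB (l : List Char) (k p : Nat) (hk : k < (l.length + 1) / 2) (hp : p < l.length) :
    (pvMakePal (pvNHx l (k + 1)) l.length)[p]? = pvSpecChar l k p := by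
  have hlen := pvNHx_len l k hk
  unfold pvMakePal pvSpecChar
  by_cases h1 : p < (l.length + 1) / 2
  · rw [List.getElem?_append_left (by omega), pvNH_get l k p hk h1]
    simp only [if_pos h1]
  · rw [List.getElem?_append_right (by omega)]
    have htl : ((pvNHx l (k + 1)).take (l.length / 2)).length = l.length / 2 := by
      simp [hlen]; omega
    rw [List.getElem?_reverse (by omega)]
    have heq : ((pvNHx l (k + 1)).take (l.length / 2)).length - 1 - (p - (pvNHx l (k + 1)).length)
        = l.length - 1 - p := by omega
    rw [heq, List.getElem?_take_of_lt (by omega), pvNH_get l k _ hk (by omega)]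
    simp only [if_neg h1]

lemma pvSideA (l : List Char) (k p : Nat) (hk : k < (l.length + 1) / 2) (hp : p < l.length) :
    ((List.range' (k + 1) ((l.length + 1) / 2 - (k + 1))).foldl (pvSetZ l.length)
        (((pvT0 l).set k (Char.ofNat (((l.take ((l.length + 1) / 2)).getD k ' ').toNat - 1))).set
          (l.length - k - 1)
          (Char.ofNat (((l.take ((l.length + 1) / 2)).getD k ' ').toNat - 1))))[p]? =
      pvSpecChar l k p := by
  have hn1 : 1 ≤ l.length := by omega
  rw [pvFold_get _ _ _ _ _ (by simp [pvT0_len l]) hp (by omega)]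
  unfold pvSpecChar
  simp only [List.getElem?_set, List.length_set, pvT0_len l, pvT0_get l p hp]
  split_ifs <;> first | rfl | (exfalso; omega)

lemma pvS1 (l : List Char) (k : Nat) (hk : k < (l.length + 1) / 2) :
    (List.range' (k + 1) ((l.length + 1) / 2 - (k + 1))).foldl (pvSetZ l.length)
        (((pvT0 l).set k (Char.ofNat (((l.take ((l.length + 1) / 2)).getD k ' ').toNat - 1))).set
          (l.length - k - 1)
          (Char.ofNat (((l.take ((l.length + 1) / 2)).getD k ' ').toNat - 1))) =
      pvMakePal (pvNHx l (k + 1)) l.length := by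
  apply List.ext_getElem?
  intro p
  by_cases hp : p < l.length
  · rw [pvSideA l k p hk hp, pvSideB l k p hk hp]
  · rw [List.getElem?_eq_none, List.getElem?_eq_none]
    · have := pvNHx_len l k hk
      simp [pvMakePal, this]; omega
    · rw [pvFold_len]; simp [pvT0_len l]; omega

lemma pvLex (k : Nat) : ∀ (a b : List Char), (∀ j, j < k → a[j]? = b[j]?) →
    (∃ x y, a[k]? = some x ∧ b[k]? = some y ∧ x < y) → a < b := by
  induction k with
  | zero =>
    intro a b _ ⟨x, y, hx, hy, hxy⟩
    match a, b with
    | x' :: a', y' :: b' =>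
      simp only [List.getElem?_cons_zero, Option.some.injEq] at hx hy
      subst hx; subst hy
      exact List.Lex.rel hxy
  | succ k ih =>
    intro a b hpre hex
    obtain ⟨x, y, hx, hy, hxy⟩ := hex
    match a, b with
    | x' :: a', y' :: b' =>
      have h0 := hpre 0 (by omega)
      simp only [List.getElem?_cons_zero, Option.some.injEq] at h0
      subst h0
      refine List.Lex.cons (ih a' b' ?_ ?_)
      · intro j hj
        have := hpre (j + 1) (by omega)
        simpa using this
      · exact ⟨x, y, by simpa using hx, by simpa using hy, hxy⟩

lemma pvS2 (l : List Char) (k : Nat) (hdom : ∀ c ∈ l, pvDomChar c = true)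
    (hk : k < (l.length + 1) / 2)
    (hc : 'a' < (l.take ((l.length + 1) / 2)).getD k ' ') :
    pvMakePal (pvNHx l (k + 1)) l.length < l := by
  have hkl : k < l.length := by omega
  obtain ⟨c, hcget⟩ : ∃ c, l[k]? = some c := ⟨l[k], List.getElem?_eq_getElem hkl⟩
  have hgd : (l.take ((l.length + 1) / 2)).getD k ' ' = c := by
    rw [List.getD_eq_getElem?_getD, List.getElem?_take_of_lt hk, hcget]; rfl
  have hmem : c ∈ l := List.mem_of_getElem? hcget
  have hdc : pvDomChar c = true := hdom c hmem
  have hle : c.toNat ≤ 126 := by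
    unfold pvDomChar at hdc
    simp at hdc; omega
  have hgt : 97 < c.toNat := by
    rw [hgd] at hc
    exact Char.lt_def.mp hc
  have hvalid : (c.toNat - 1).isValidChar := Or.inl (by omega)
  have hdto : (Char.ofNat (c.toNat - 1)).toNat = c.toNat - 1 := by
    simp [Char.ofNat, hvalid]
  apply pvLex k
  · intro j hj
    rw [pvSideB l k j hk (by omega)]
    unfold pvSpecChar
    simp only [if_pos (show j < (l.length + 1) / 2 by omega), if_pos hj]
  · refine ⟨Char.ofNat (c.toNat - 1), c, ?_, hcget, ?_⟩
    · rw [pvSideB l k k hk hkl]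
      unfold pvSpecChar
      simp [if_pos hk]
      rw [List.getElem?_take_of_lt hk, hcget]
      rfl
    · have hlt : (Char.ofNat (c.toNat - 1)).toNat < c.toNat := by omega
      exact Char.lt_def.mpr hlt

lemma pvMain (l : List Char) (hdom : ∀ c ∈ l, pvDomChar c = true) :
    ∀ k, k ≤ (l.length + 1) / 2 →
    pvALoop l l.length (pvT0 l) k =
      if pvTrim (l.take ((l.length + 1) / 2)) k = 0 then ['-', '1']
      else pvMakePal (pvNHx l (pvTrim (l.take ((l.length + 1) / 2)) k)) l.length := by
  intro k
  induction k with
  | zero => intro _; simp [pvALoop, pvTrim]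
  | succ k ih =>
    intro hk1
    have hk : k < (l.length + 1) / 2 := by omega
    have hgd := pvT0_getD l k hk
    by_cases hc : 'a' < (l.take ((l.length + 1) / 2)).getD k ' '
    · simp only [pvALoop, pvTrim, hgd, if_pos hc, if_neg (not_le.mpr hc)]
      rw [pvS1 l k hk, if_pos (pvS2 l k hdom hk hc)]
      simp
    · simp only [pvALoop, pvTrim, hgd, if_neg hc, if_pos (not_lt.mp hc)]
      exact ih (by omega)

-- ===== VERDICT (by name: the statement is the Claim_ definition above) =====
theorem solution_spec : Claim_equal_solution := by
  intro s hdom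
  unfold Spec_solution solution solution_alt
  have hd : ∀ c ∈ s.toList, pvDomChar c = true := by
    unfold Dom_solution pvDomStr at hdom
    simpa [List.all_eq_true] using hdom
  set l := s.toList with hl
  have htake : (l.take ((l.length + 1) / 2)).take (l.length / 2) = l.take (l.length / 2) := by
    rw [List.take_take]
    congr 1
    omega
  show (if _ < l then _ else _) = (if _ < l then _ else _)
  rw [show pvMakePal (l.take ((l.length + 1) / 2)) l.length
      = l.take ((l.length + 1) / 2) ++ (l.take (l.length / 2)).reverse by
    unfold pvMakePal; rw [htake]]
  split_ifs with hlt
  · rfl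
  · rw [show (l.take ((l.length + 1) / 2) ++ (l.take (l.length / 2)).reverse) = pvT0 l from rfl,
      pvMain l hd _ le_rfl, pvHalfLen l]
    by_cases h0 : pvTrim (List.take ((l.length + 1) / 2) l) ((l.length + 1) / 2) = 0
    · rw [if_pos h0]
      simp [h0]
    · rw [if_neg h0]
      simp only [h0, if_false]
      rfl
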